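-- pv_equiv track=rewrite | github.com/adiens916/NOTE-algorithm | problems/Baekjoon_Online_Judge/Step_by_step/11_Sorting/1181_단어_정렬.py | sort_words_by_length
-- ===== SOURCE A (Python) =====
-- MAX_LEN = 50
--
-- def sort_words_by_length(words: list[str], N) -> list[str]:
--     words_by_len = [[""] * N for _ in range(MAX_LEN + 1)]
--
--     for word in words:
--         length = len(word)
--         for i in range(N):
--             comp_word = words_by_len[length][i]
--             # 배열의 빈 곳에는 무조건 넣음
--             # 예시: 맨 처음, 맨 마지막인 경우 등
--             if comp_word == "":
--                 words_by_len[length][i] = word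
--                 break
--             # 중복이면 넘어감
--             elif word == comp_word:
--                 break
--             # 비교 중인 단어보다 사전순으로 먼저 오는 경우
--             elif word < comp_word:
--                 # 삽입 정렬 이용
--                 inserting = word
--                 for j in range(i, N):
--                     # 기존 단어 보존
--                     preserving = words_by_len[length][j]
--                     if inserting:
--                         # 기존 위치에 새 단어 넣음
--                         words_by_len[length][j] = inserting
--                         # 새로 넣을 단어를 아까 보존했던 단어로 바꿈
--                         inserting = preserving
--                     else:
--                         break
--                 break
--
--     return words_by_len
-- ===== SOURCE B (Python) =====
-- MAX_LEN = 50
--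
-- def sort_words_by_length(words: list[str], N) -> list[str]:
--     result = [[""] * N for _ in range(MAX_LEN + 1)]
--     for w in sorted(set(words)):
--         l = len(w)
--         for i in range(N):
--             if result[l][i] == "":
--                 result[l][i] = w
--                 break
--     return result
-- ===== Notes on version B (the rewrite author's own statement) =====
-- stated objective: alternative
-- what changed: A incrementally maintains each length-bucket with an in-place insertion-sort-with-shift and dedup scan per word; B instead sorts and dedups all words once globally (sorted(set(words))) and then only fills each word into the first empty slot of its length bucket, with no comparison or shifting logic at all.
import Mathlib
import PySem

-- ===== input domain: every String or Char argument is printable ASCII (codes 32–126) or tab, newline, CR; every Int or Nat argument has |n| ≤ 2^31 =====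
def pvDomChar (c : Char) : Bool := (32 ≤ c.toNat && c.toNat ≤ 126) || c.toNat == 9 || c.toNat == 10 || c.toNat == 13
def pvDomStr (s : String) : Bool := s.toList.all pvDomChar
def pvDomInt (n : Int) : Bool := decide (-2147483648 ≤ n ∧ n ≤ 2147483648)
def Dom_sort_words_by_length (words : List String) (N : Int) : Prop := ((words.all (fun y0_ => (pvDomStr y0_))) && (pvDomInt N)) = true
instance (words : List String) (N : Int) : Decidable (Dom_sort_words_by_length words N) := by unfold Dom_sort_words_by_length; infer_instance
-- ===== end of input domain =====

-- B replaces A's per-word in-bucket insertion-sort (compare/shift/dedup scan) by one global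
-- sorted(set(words)) pass that only drops each word into the first empty slot of its bucket
-- (objective: alternative decomposition, same result).

-- ===== PORT A =====
-- inner `for j in range(i, N)` shift loop: walks the rest of the bucket, placing `inserting`
-- and carrying the displaced word, stopping at an empty cell ('' is falsy); the element pushed
-- past the end is dropped, exactly as Python's loop ends.
def pvShiftA (ins : String) (l : List String) : List String :=
  match l with
  | [] => []
  | c :: rest => if ins = "" then c :: rest else ins :: pvShiftA c rest

-- inner `for i in range(N)` scan over the bucket (the bucket has exactly N cells, so the index
-- loop is this structural recursion); branches in Python's order: empty cell / duplicate /
-- insert-with-shift / move on; falling off the end drops the word.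
def pvInsertA (bucket : List String) (word : String) : List String :=
  match bucket with
  | [] => []
  | c :: rest =>
    if c = "" then word :: rest
    else if word = c then c :: rest
    else if word < c then pvShiftA word (c :: rest)
    else c :: pvInsertA rest word

-- `words_by_len[length]` is in range for length ≤ 50 (= MAX_LEN); for length > 50 Python raises
-- IndexError when N > 0 (excluded by Pre_), and when N ≤ 0 the inner loop never runs, so the
-- out-of-range getD/set no-ops match Python exactly.  len(word) = word.toList.length (exact).
def sort_words_by_length (words : List String) (N : Int) : List (List String) :=
  words.foldl (fun wb word =>
    wb.set word.toList.length (pvInsertA (wb.getD word.toList.length []) word))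
    ((List.range 51).map (fun _ => List.replicate N.toNat ""))

-- ===== PORT B =====
-- `for i in range(N): if result[l][i] == "": result[l][i] = w; break` over the N-cell bucket.
def pvFillB (bucket : List String) (word : String) : List String :=
  match bucket with
  | [] => []
  | c :: rest => if c = "" then word :: rest else c :: pvFillB rest word

-- `for w in sorted(set(words))`: sorted of a set without a key is order-independent (exact).
def sort_words_by_length_alt (words : List String) (N : Int) : List (List String) :=
  (PySem.List.sorted (PySem.Set.ofList words) (fun x => x) false).foldl
    (fun r word => r.set word.toList.length (pvFillB (r.getD word.toList.length []) word))
    ((List.range 51).map (fun _ => List.replicate N.toNat ""))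

-- ===== PRECONDITION & SPEC =====
-- Pre_ excludes exactly the inputs where Python A raises IndexError: a word longer than
-- MAX_LEN = 50 while N > 0 (with N ≤ 0 the inner loop never indexes and A returns normally).
def Pre_sort_words_by_length (words : List String) (N : Int) : Prop :=
  N ≤ 0 ∨ ∀ w ∈ words, w.toList.length ≤ 50
instance (words : List String) (N : Int) : Decidable (Pre_sort_words_by_length words N) := by
  unfold Pre_sort_words_by_length; infer_instance

def pvWitness_sort_words_by_length : List String × Int := (["ab", "a", "b", "ab"], 2)

def Spec_sort_words_by_length (words : List String) (N : Int) (out : List (List String)) : Prop := out = sort_words_by_length_alt words N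
instance (words : List String) (N : Int) (out : List (List String)) : Decidable (Spec_sort_words_by_length words N out) := by unfold Spec_sort_words_by_length; infer_instance

-- ===== CLAIM (what is proved, stated in full; the proofs are below) =====
def Claim_equal_sort_words_by_length : Prop := ∀ (words : List String) (N : Int), Dom_sort_words_by_length words N → Pre_sort_words_by_length words N → Spec_sort_words_by_length words N (sort_words_by_length words N)

-- ===== LEMMAS AND PROOFS =====

-- a bucket state: a prefix of real words padded with "" to the bucket size
def pvPad (n : Nat) (l : List String) : List String := l ++ List.replicate (n - l.length) ""

-- sorted-insert with dedup: the abstract effect of one pvInsertA step on the word prefix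
def pvInsD (w : String) : List String → List String
  | [] => [w]
  | c :: r => if w = c then c :: r else if w < c then w :: c :: r else c :: pvInsD w r

def pvStep (S : List String) (w : String) : List String := if w = "" then S else pvInsD w S

theorem pvShiftA_empty (l : List String) : pvShiftA "" l = l := by
  cases l <;> simp [pvShiftA]

theorem pvInsertA_empty (b : List String) : pvInsertA b "" = b := by
  induction b with
  | nil => rfl
  | cons c rest ih =>
    simp only [pvInsertA]
    split_ifs with h1 h2 h3
    · rw [h1]
    · rfl
    · simp [pvShiftA]
    · rw [ih]

theorem pvFillB_empty (b : List String) : pvFillB b "" = b := by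
  induction b with
  | nil => rfl
  | cons c rest ih =>
    by_cases hc : c = "" <;> simp [pvFillB, hc, ih]

theorem pvPad_nil (n : Nat) : pvPad n [] = List.replicate n "" := by
  simp [pvPad]

theorem pvPad_cons (c : String) (r : List String) (n : Nat) :
    pvPad (n + 1) (c :: r) = c :: pvPad n r := by
  simp [pvPad, Nat.succ_sub_succ]

theorem pvShiftA_pad : ∀ (S : List String) (n : Nat) (w : String), w ≠ "" →
    (∀ x ∈ S, x ≠ "") → S.length ≤ n →
    pvShiftA w (pvPad n S) = pvPad n ((w :: S).take n) := by
  intro S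
  induction S with
  | nil =>
    intro n w hw _ _
    cases n with
    | zero => simp [pvPad, pvShiftA]
    | succ m =>
      rw [pvPad_nil, List.replicate_succ]
      simp [pvShiftA, hw, pvShiftA_empty, pvPad]
  | cons c r ih =>
    intro n w hw hS hlen
    have hc : c ≠ "" := hS c (by simp)
    cases n with
    | zero => exact absurd hlen (by simp)
    | succ m =>
      have hr : r.length ≤ m := by simpa using hlen
      rw [pvPad_cons]
      rw [show pvShiftA w (c :: pvPad m r) = w :: pvShiftA c (pvPad m r) from by
        simp [pvShiftA, hw]]
      rw [ih m c hc (fun x hx => hS x (by simp [hx])) hr]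
      rw [List.take_succ_cons, pvPad_cons]

theorem pvTake_cons_take (c : String) (r : List String) (m : Nat) :
    (c :: r.take m).take m = (c :: r).take m := by
  cases m with
  | zero => simp
  | succ k => simp [List.take_take]

theorem pvTake_insD (w : String) : ∀ (S : List String) (n : Nat),
    (pvInsD w (S.take n)).take n = (pvInsD w S).take n := by
  intro S
  induction S with
  | nil => intro n; simp
  | cons c r ih =>
    intro n
    cases n with
    | zero => simp
    | succ m =>
      rw [List.take_succ_cons]
      by_cases h1 : w = c
      · simp [pvInsD, h1, List.take_succ_cons, List.take_take]
      · by_cases h2 : w < c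
        · simp [pvInsD, h1, h2, List.take_succ_cons, pvTake_cons_take]
        · simp [pvInsD, h1, h2, List.take_succ_cons, ih m]

theorem pvInsertA_pad (w : String) : ∀ (S : List String) (n : Nat), w ≠ "" →
    (∀ x ∈ S, x ≠ "") → S.length ≤ n →
    pvInsertA (pvPad n S) w = pvPad n ((pvInsD w S).take n) := by
  intro S
  induction S with
  | nil =>
    intro n hw _ _
    cases n with
    | zero => simp [pvPad, pvInsertA, pvInsD]
    | succ m =>
      rw [pvPad_nil, List.replicate_succ]
      simp [pvInsertA, pvInsD, pvPad]
  | cons c r ih =>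
    intro n hw hS hlen
    have hc : c ≠ "" := hS c (by simp)
    cases n with
    | zero => exact absurd hlen (by simp)
    | succ m =>
      have hr : r.length ≤ m := by simpa using hlen
      by_cases h1 : w = c
      · rw [pvPad_cons]
        simp [pvInsertA, pvInsD, hc, h1, List.take_succ_cons,
          List.take_of_length_le hr, pvPad_cons]
      · by_cases h2 : w < c
        · have hstep : pvInsertA (pvPad (m + 1) (c :: r)) w
              = pvShiftA w (pvPad (m + 1) (c :: r)) := by
            rw [pvPad_cons]; simp [pvInsertA, hc, h1, h2]
          rw [hstep, pvShiftA_pad (c :: r) (m + 1) w hw hS hlen]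
          simp [pvInsD, h1, h2]
        · have hstep : pvInsertA (pvPad (m + 1) (c :: r)) w
              = c :: pvInsertA (pvPad m r) w := by
            rw [pvPad_cons]; simp [pvInsertA, hc, h1, h2]
          rw [hstep, ih m hw (fun x hx => hS x (by simp [hx])) hr]
          simp [pvInsD, h1, h2, List.take_succ_cons, pvPad_cons]

theorem pvFillB_pad (w : String) : ∀ (S : List String) (n : Nat), w ≠ "" →
    (∀ x ∈ S, x ≠ "") → S.length ≤ n →
    pvFillB (pvPad n S) w = pvPad n ((S ++ [w]).take n) := by
  intro S
  induction S with
  | nil =>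
    intro n hw _ _
    cases n with
    | zero => simp [pvPad, pvFillB]
    | succ m =>
      rw [pvPad_nil, List.replicate_succ]
      simp [pvFillB, pvPad]
  | cons c r ih =>
    intro n hw hS hlen
    have hc : c ≠ "" := hS c (by simp)
    cases n with
    | zero => exact absurd hlen (by simp)
    | succ m =>
      have hr : r.length ≤ m := by simpa using hlen
      rw [pvPad_cons]
      rw [show pvFillB (c :: pvPad m r) w = c :: pvFillB (pvPad m r) w from by
        simp [pvFillB, hc]]
      rw [ih m hw (fun x hx => hS x (by simp [hx])) hr]
      simp [List.cons_append, List.take_succ_cons, pvPad_cons]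

theorem pvMem_insD (w x : String) : ∀ S, x ∈ pvInsD w S ↔ x = w ∨ x ∈ S := by
  intro S
  induction S with
  | nil => simp [pvInsD]
  | cons c r ih =>
    by_cases h1 : w = c
    · subst h1; simp [pvInsD, List.mem_cons]
    · by_cases h2 : w < c
      · simp [pvInsD, h1, h2, List.mem_cons]
      · simp [pvInsD, h1, h2, List.mem_cons, ih]; tauto

theorem pvPairwise_insD (w : String) : ∀ S, S.Pairwise (· < ·) →
    (pvInsD w S).Pairwise (· < ·) := by
  intro S
  induction S with
  | nil => intro _; simp [pvInsD]
  | cons c r ih =>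
    intro hp
    rcases List.pairwise_cons.mp hp with ⟨hcr, hr⟩
    by_cases h1 : w = c
    · simpa [pvInsD, h1] using hp
    · by_cases h2 : w < c
      · have he : pvInsD w (c :: r) = w :: c :: r := by simp [pvInsD, h1, h2]
        rw [he, List.pairwise_cons]
        refine ⟨fun y hy => ?_, hp⟩
        rcases List.mem_cons.mp hy with rfl | hy
        · exact h2
        · exact lt_trans h2 (hcr y hy)
      · have hcw : c < w := by
          rcases lt_trichotomy w c with h | h | h
          · exact absurd h h2
          · exact absurd h h1
          · exact h
        have he : pvInsD w (c :: r) = c :: pvInsD w r := by simp [pvInsD, h1, h2]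
        rw [he, List.pairwise_cons]
        refine ⟨fun y hy => ?_, ih hr⟩
        rcases (pvMem_insD w y r).mp hy with rfl | hy
        · exact hcw
        · exact hcr y hy

theorem pvTake_take_append (n : Nat) (T X : List String) :
    (T.take n ++ X).take n = (T ++ X).take n := by
  rw [List.take_append, List.take_append, List.take_take, List.length_take]
  have h : n - min n T.length = n - T.length := by omega
  rw [h]
  simp

theorem pvFoldA (n : Nat) : ∀ (ws S : List String), (∀ x ∈ S, x ≠ "") →
    ws.foldl pvInsertA (pvPad n (S.take n)) = pvPad n ((ws.foldl pvStep S).take n) := by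
  intro ws
  induction ws with
  | nil => intro S _; rfl
  | cons w ws ih =>
    intro S hS
    rw [List.foldl_cons, List.foldl_cons]
    by_cases hw : w = ""
    · rw [hw, pvInsertA_empty, show pvStep S "" = S from by simp [pvStep]]
      exact ih S hS
    · rw [pvInsertA_pad w (S.take n) n hw
        (fun x hx => hS x (List.mem_of_mem_take hx)) (List.length_take_le _ _)]
      rw [pvTake_insD]
      have hS' : ∀ x ∈ pvStep S w, x ≠ "" := by
        intro x hx
        simp only [pvStep, hw, if_false] at hx
        rcases (pvMem_insD w x S).mp hx with rfl | hx
        · exact hw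
        · exact hS x hx
      rw [show pvInsD w S = pvStep S w from by simp [pvStep, hw]]
      exact ih (pvStep S w) hS'

theorem pvFoldB (n : Nat) : ∀ (L S : List String), (∀ x ∈ S, x ≠ "") → S.length ≤ n →
    L.foldl pvFillB (pvPad n S)
      = pvPad n ((S ++ L.filter (fun x => decide (x ≠ ""))).take n) := by
  intro L
  induction L with
  | nil => intro S hS hlen; simp [List.take_of_length_le hlen, pvPad]
  | cons w L ih =>
    intro S hS hlen
    rw [List.foldl_cons]
    by_cases hw : w = ""
    · rw [hw, pvFillB_empty, ih S hS hlen]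
      simp
    · rw [pvFillB_pad w S n hw hS hlen]
      have hmem : ∀ x ∈ (S ++ [w]).take n, x ≠ "" := by
        intro x hx
        rcases List.mem_append.mp (List.mem_of_mem_take hx) with h | h
        · exact hS x h
        · simp at h; subst h; exact hw
      rw [ih ((S ++ [w]).take n) hmem (List.length_take_le _ _)]
      rw [pvTake_take_append]
      simp [hw, List.append_assoc]

theorem pvMem_foldl_pvStep (x : String) : ∀ (ws S : List String),
    x ∈ ws.foldl pvStep S ↔ x ∈ S ∨ (x ∈ ws ∧ x ≠ "") := by
  intro ws
  induction ws with
  | nil => intro S; simp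
  | cons w ws ih =>
    intro S
    rw [List.foldl_cons]
    by_cases hw : w = ""
    · rw [show pvStep S w = S from by simp [pvStep, hw], ih S]
      subst hw
      simp only [List.mem_cons]
      constructor
      · rintro (hx | ⟨hx, hne⟩)
        · exact Or.inl hx
        · exact Or.inr ⟨Or.inr hx, hne⟩
      · rintro (hx | ⟨rfl | hx, hne⟩)
        · exact Or.inl hx
        · exact absurd rfl hne
        · exact Or.inr ⟨hx, hne⟩
    · rw [show pvStep S w = pvInsD w S from by simp [pvStep, hw], ih (pvInsD w S),
        pvMem_insD]
      simp only [List.mem_cons]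
      constructor
      · rintro ((rfl | hx) | ⟨hx, hne⟩)
        · exact Or.inr ⟨Or.inl rfl, hw⟩
        · exact Or.inl hx
        · exact Or.inr ⟨Or.inr hx, hne⟩
      · rintro (hx | ⟨rfl | hx, hne⟩)
        · exact Or.inl (Or.inr hx)
        · exact Or.inl (Or.inl rfl)
        · exact Or.inr ⟨hx, hne⟩

theorem pvPairwise_foldl_pvStep : ∀ (ws S : List String), S.Pairwise (· < ·) →
    (ws.foldl pvStep S).Pairwise (· < ·) := by
  intro ws
  induction ws with
  | nil => intro S h; exact h
  | cons w ws ih =>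
    intro S h
    rw [List.foldl_cons]
    apply ih
    by_cases hw : w = ""
    · simpa [pvStep, hw] using h
    · simpa [pvStep, hw] using pvPairwise_insD w S h

-- two strictly increasing lists with the same members are equal
theorem pvSortedExt (l1 l2 : List String) (h1 : l1.Pairwise (· < ·))
    (h2 : l2.Pairwise (· < ·)) (hm : ∀ x, x ∈ l1 ↔ x ∈ l2) : l1 = l2 := by
  haveI : Std.Antisymm ((· < ·) : String → String → Prop) :=
    ⟨fun a b h h' => absurd h' (lt_asymm h)⟩
  refine List.Perm.eq_of_pairwise' h1 h2 ?_
  refine List.perm_of_nodup_nodup_toFinset_eq ?_ ?_ ?_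
  · exact h1.imp ne_of_lt
  · exact h2.imp ne_of_lt
  · ext x; simp [hm x]

-- the bucket at index ℓ of the fold is the fold of the length-ℓ words over that bucket alone
theorem pvBucket (g : List String → String → List String) :
    ∀ (ws : List String) (init : List (List String)) (ℓ : Nat), ℓ < init.length →
    ((ws.foldl (fun wb w => wb.set w.toList.length (g (wb.getD w.toList.length []) w)) init).getD ℓ [])
      = (ws.filter (fun w => w.toList.length == ℓ)).foldl g (init.getD ℓ []) := by
  intro ws
  induction ws with
  | nil => intro init ℓ _; rfl
  | cons w ws ih =>
    intro init ℓ hℓ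
    rw [List.foldl_cons, List.filter_cons]
    rw [ih (init.set w.toList.length (g (init.getD w.toList.length []) w)) ℓ
      (by simpa using hℓ)]
    by_cases hk : w.toList.length = ℓ
    · subst hk
      have hget : (init.set w.toList.length (g (init.getD w.toList.length []) w)).getD
          w.toList.length [] = g (init.getD w.toList.length []) w := by
        rw [List.getD_eq_getElem _ _ (by simpa using hℓ), List.getElem_set_self]
      rw [hget, if_pos (by simp)]
      rfl
    · have hget : (init.set w.toList.length (g (init.getD w.toList.length []) w)).getD
          ℓ [] = init.getD ℓ [] := by
        have hk2 : ¬ w.length = ℓ := by simpa using hk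
        simp [List.getD, hk2]
      rw [hget, if_neg (by simpa using hk)]

theorem pvLenFold (g : List String → String → List String) :
    ∀ (ws : List String) (init : List (List String)),
    (ws.foldl (fun wb w => wb.set w.toList.length (g (wb.getD w.toList.length []) w)) init).length
      = init.length := by
  intro ws
  induction ws with
  | nil => intro init; rfl
  | cons w ws ih => intro init; rw [List.foldl_cons, ih]; simp

theorem sort_words_by_length_spec : Claim_equal_sort_words_by_length := by
  intro words N _ _
  unfold Spec_sort_words_by_length sort_words_by_length sort_words_by_length_alt
  refine List.ext_getElem (by rw [pvLenFold, pvLenFold]) ?_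
  intro i h1 h2
  rw [pvLenFold] at h1
  have hi : i < ((List.range 51).map
      (fun _ => List.replicate N.toNat "")).length := h1
  rw [(List.getD_eq_getElem _ [] (by rw [pvLenFold]; exact hi)).symm,
      (List.getD_eq_getElem _ [] (by rw [pvLenFold]; exact hi)).symm]
  rw [pvBucket pvInsertA words _ i hi, pvBucket pvFillB _ _ i hi]
  have hinitD : (((List.range 51).map
      (fun _ => List.replicate N.toNat "")).getD i []) = List.replicate N.toNat "" := by
    rw [List.getD_eq_getElem _ _ hi, List.getElem_map]
  rw [hinitD]
  have e1 : (words.filter (fun w => w.toList.length == i)).foldl pvInsertA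
      (List.replicate N.toNat "")
      = pvPad N.toNat (((words.filter (fun w => w.toList.length == i)).foldl
          pvStep []).take N.toNat) := by
    have h := pvFoldA N.toNat (words.filter (fun w => w.toList.length == i)) [] (by simp)
    simpa [pvPad_nil] using h
  have e2 : ((PySem.List.sorted (PySem.Set.ofList words) (fun x => x) false).filter
        (fun w => w.toList.length == i)).foldl pvFillB (List.replicate N.toNat "")
      = pvPad N.toNat ((((PySem.List.sorted (PySem.Set.ofList words) (fun x => x) false).filter
          (fun w => w.toList.length == i)).filter
          (fun x => decide (x ≠ ""))).take N.toNat) := by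
    have h := pvFoldB N.toNat ((PySem.List.sorted (PySem.Set.ofList words)
        (fun x => x) false).filter (fun w => w.toList.length == i)) [] (by simp) (by simp)
    simpa [pvPad_nil] using h
  rw [e1, e2]
  congr 2
  apply pvSortedExt
  · exact pvPairwise_foldl_pvStep _ [] (by simp)
  · exact ((PySem.List.sorted_ofList_pairwise_lt (xs := words)).filter _).filter _
  · intro x
    rw [pvMem_foldl_pvStep]
    simp only [List.not_mem_nil, false_or, List.mem_filter, decide_eq_true_eq,
      PySem.List.mem_sorted, PySem.Set.mem_ofList]
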